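-- pv_equiv track=rewrite | github.com/Vilzuge/SudokuSolverGUI | SudokuSolverGUI.py | whatSquare
-- ===== SOURCE A (Python) =====
-- def whatSquare(sudoku2Darray, row, column):
--     # checking which sudoku square we are currently on, and returning that one
--     square = []
--     if row < 3:
--         if column < 3:
--             square = [sudoku2Darray[index][0:3] for index in range(0, 3)]
--             return square
--         elif column < 6:
--             square = [sudoku2Darray[index][3:6] for index in range(0, 3)]
--             return square
--         else:
--             square = [sudoku2Darray[index][6:9] for index in range(0, 3)]
--             return square
--
--     elif row < 6:
--         if column < 3:
--             square = [sudoku2Darray[index][0:3] for index in range(3, 6)]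
--             return square
--         elif column < 6:
--             square = [sudoku2Darray[index][3:6] for index in range(3, 6)]
--             return square
--         else:
--             square = [sudoku2Darray[index][6:9] for index in range(3, 6)]
--             return square
--
--     else:
--         if column < 3:
--             square = [sudoku2Darray[index][0:3] for index in range(6, 9)]
--             return square
--         elif column < 6:
--             square = [sudoku2Darray[index][3:6] for index in range(6, 9)]
--             return square
--         else:
--             square = [sudoku2Darray[index][6:9] for index in range(6, 9)]
--             return square
-- ===== SOURCE B (Python) =====
-- def whatSquare(sudoku2Darray, row, column):
--     # Fetch the three rows of the band by computed index; within each row keep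
--     # exactly the cells whose index lies in the same third as the queried column
--     # (a per-cell membership filter -- no branch table and no slicing).
--     band = (row >= 3) + (row >= 6)
--     bc = (column >= 3) + (column >= 6)
--     return [[v for j, v in enumerate(sudoku2Darray[3 * band + k]) if j // 3 == bc]
--             for k in range(3)]
-- ===== Notes on version B (the rewrite author's own statement) =====
-- stated objective: alternative
-- what changed: Replaces the 9-way nested branch that picks fixed index ranges and slices them by computing the band arithmetically, fetching its three rows by direct index, and selecting each row's cells with a per-cell filter on the cell's index third (j // 3) over enumerate, with no slicing and no branch table.
import Mathlib
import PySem

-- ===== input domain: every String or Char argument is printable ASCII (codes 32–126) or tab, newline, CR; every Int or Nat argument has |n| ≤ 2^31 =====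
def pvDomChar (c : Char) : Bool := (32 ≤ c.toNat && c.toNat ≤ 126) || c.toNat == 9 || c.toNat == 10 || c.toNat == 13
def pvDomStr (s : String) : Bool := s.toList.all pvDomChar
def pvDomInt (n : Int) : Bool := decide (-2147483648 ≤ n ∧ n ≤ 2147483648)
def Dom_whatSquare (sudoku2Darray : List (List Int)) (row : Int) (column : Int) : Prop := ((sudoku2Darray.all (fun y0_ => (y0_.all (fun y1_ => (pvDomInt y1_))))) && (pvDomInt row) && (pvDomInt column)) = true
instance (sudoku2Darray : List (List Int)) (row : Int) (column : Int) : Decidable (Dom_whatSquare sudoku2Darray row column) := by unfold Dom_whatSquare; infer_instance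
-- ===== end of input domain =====

-- B replaces A's 9-way branch over fixed index ranges + slicing by a computed band index
-- and a per-cell filter on each row's cell indices (objective: alternative).
-- Return value only; neither program mutates its arguments.

-- ===== PORT A =====
def whatSquare (sudoku2Darray : List (List Int)) (row : Int) (column : Int) : List (List Int) :=
  if row < 3 then
    if column < 3 then
      (PySem.List.pyRange 0 3 1).map (fun index =>
        PySem.List.slice ((PySem.List.pyGet? sudoku2Darray index).getD []) (some 0) (some 3))
    else if column < 6 then
      (PySem.List.pyRange 0 3 1).map (fun index =>
        PySem.List.slice ((PySem.List.pyGet? sudoku2Darray index).getD []) (some 3) (some 6))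
    else
      (PySem.List.pyRange 0 3 1).map (fun index =>
        PySem.List.slice ((PySem.List.pyGet? sudoku2Darray index).getD []) (some 6) (some 9))
  else if row < 6 then
    if column < 3 then
      (PySem.List.pyRange 3 6 1).map (fun index =>
        PySem.List.slice ((PySem.List.pyGet? sudoku2Darray index).getD []) (some 0) (some 3))
    else if column < 6 then
      (PySem.List.pyRange 3 6 1).map (fun index =>
        PySem.List.slice ((PySem.List.pyGet? sudoku2Darray index).getD []) (some 3) (some 6))
    else
      (PySem.List.pyRange 3 6 1).map (fun index =>
        PySem.List.slice ((PySem.List.pyGet? sudoku2Darray index).getD []) (some 6) (some 9))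
  else
    if column < 3 then
      (PySem.List.pyRange 6 9 1).map (fun index =>
        PySem.List.slice ((PySem.List.pyGet? sudoku2Darray index).getD []) (some 0) (some 3))
    else if column < 6 then
      (PySem.List.pyRange 6 9 1).map (fun index =>
        PySem.List.slice ((PySem.List.pyGet? sudoku2Darray index).getD []) (some 3) (some 6))
    else
      (PySem.List.pyRange 6 9 1).map (fun index =>
        PySem.List.slice ((PySem.List.pyGet? sudoku2Darray index).getD []) (some 6) (some 9))

-- ===== PORT B =====
-- B: compute the band, fetch its three rows by index, and keep in each row exactly
-- the cells whose index is in the same third (j // 3) as the queried column.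
def whatSquare_alt (sudoku2Darray : List (List Int)) (row : Int) (column : Int) : List (List Int) :=
  let band : Int := (if row ≥ 3 then 1 else 0) + (if row ≥ 6 then 1 else 0)
  let bc : Int := (if column ≥ 3 then 1 else 0) + (if column ≥ 6 then 1 else 0)
  (PySem.List.pyRange 0 3 1).map (fun k =>
    (PySem.List.enumerate ((PySem.List.pyGet? sudoku2Darray (3 * band + k)).getD [])).filterMap
      (fun q => if PySem.Int.floordiv q.1 3 = bc then some q.2 else none))

-- ===== PRECONDITION & SPEC =====
-- Pre_ excludes exactly the inputs on which Python A raises IndexError: grids with fewer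
-- rows than the selected row band needs (3, 6 or 9 depending on the row branch taken).
def Pre_whatSquare (sudoku2Darray : List (List Int)) (row : Int) (column : Int) : Prop :=
  (if row < 3 then 3 else if row < 6 then 6 else 9) ≤ sudoku2Darray.length
instance (sudoku2Darray : List (List Int)) (row : Int) (column : Int) : Decidable (Pre_whatSquare sudoku2Darray row column) := by unfold Pre_whatSquare; infer_instance

def pvWitness_whatSquare : List (List Int) × Int × Int :=
  ([[1, 2, 3], [4, 5, 6], [7, 8, 9]], 0, 2)

def Spec_whatSquare (sudoku2Darray : List (List Int)) (row : Int) (column : Int) (out : List (List Int)) : Prop := out = whatSquare_alt sudoku2Darray row column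
instance (sudoku2Darray : List (List Int)) (row : Int) (column : Int) (out : List (List Int)) : Decidable (Spec_whatSquare sudoku2Darray row column out) := by unfold Spec_whatSquare; infer_instance

-- ===== CLAIM (what is proved, stated in full; the proofs are below) =====
def Claim_equal_whatSquare : Prop := ∀ (sudoku2Darray : List (List Int)) (row : Int) (column : Int), Dom_whatSquare sudoku2Darray row column → Pre_whatSquare sudoku2Darray row column → Spec_whatSquare sudoku2Darray row column (whatSquare sudoku2Darray row column)

-- ===== LEMMAS AND PROOFS =====

-- Filtering an enumeration by "index // 3 = c" keeps exactly the contiguous band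
-- [3c, 3c+3) of the list, i.e. (drop (3c)).take 3 (stated with running start k).
theorem pv_enum_band {α β : Type} (G : α → β) (c : Int) (hc : 0 ≤ c) :
    ∀ (r : List α) (k : Nat),
      (PySem.List.enumerate r (k : Int)).filterMap
        (fun q => if PySem.Int.floordiv q.1 3 = c then some (G q.2) else none)
      = ((r.drop ((3*c).toNat - k)).take ((3*c + 3).toNat - max (3*c).toNat k)).map G := by
  intro r
  induction r with
  | nil => intro k; simp [PySem.List.enumerate_nil]
  | cons x xs ih =>
    intro k
    rw [PySem.List.enumerate_cons]
    have hcast : (k : Int) + 1 = ((k + 1 : Nat) : Int) := by push_cast; ring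
    rw [hcast, List.filterMap_cons]
    have hfd : PySem.Int.floordiv (k : Int) 3 = (k : Int) / 3 :=
      PySem.Int.floordiv_eq_ediv_of_pos (by norm_num)
    by_cases hk : (3*c).toNat ≤ k ∧ k < (3*c).toNat + 3
    · have hcond : PySem.Int.floordiv (k : Int) 3 = c := by rw [hfd]; omega
      rw [if_pos hcond, ih (k + 1)]
      have h1 : (3*c).toNat - k = 0 := by omega
      have h2 : (3*c).toNat - (k + 1) = 0 := by omega
      rw [h1, h2]
      simp only [List.drop_zero]
      have h3 : (3*c + 3).toNat - max (3*c).toNat k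
          = ((3*c + 3).toNat - max (3*c).toNat (k + 1)) + 1 := by omega
      rw [h3, List.take_succ_cons, List.map_cons]
    · have hcond : ¬ PySem.Int.floordiv (k : Int) 3 = c := by rw [hfd]; omega
      rw [if_neg hcond, ih (k + 1)]
      by_cases hk2 : k < (3*c).toNat
      · have h1 : (3*c).toNat - k = ((3*c).toNat - (k + 1)) + 1 := by omega
        rw [h1, List.drop_succ_cons]
        have h2 : max (3*c).toNat k = max (3*c).toNat (k + 1) := by omega
        rw [h2]
      · have h1 : (3*c).toNat - k = 0 := by omega
        have h2 : (3*c).toNat - (k + 1) = 0 := by omega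
        have h3 : (3*c + 3).toNat - max (3*c).toNat k = 0 := by omega
        have h4 : (3*c + 3).toNat - max (3*c).toNat (k + 1) = 0 := by omega
        rw [h1, h2, h3, h4]
        simp

-- Inner scan of B on one row.
theorem pv_inner (c' : Int) (hc : 0 ≤ c') (r : List Int) :
    (PySem.List.enumerate r).filterMap (fun q =>
        if PySem.Int.floordiv q.1 3 = c' then some q.2 else none)
    = (r.drop (3*c').toNat).take 3 := by
  have h := pv_enum_band (G := fun v : Int => v) c' hc r 0
  have h3 : (3*c' + 3).toNat - (3*c').toNat = 3 := by omega
  simpa [h3] using h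

-- Python slice r[u:u+3] as drop/take, for nonnegative literal bounds.
theorem pv_slice3 (r : List Int) (u v : Int) (hu : 0 ≤ u) (hv : v = u + 3) :
    PySem.List.slice r (some u) (some v) = (r.drop u.toNat).take 3 := by
  subst hv
  rw [PySem.List.slice_toNat r hu (by omega)]
  congr 1
  omega

-- One cell of the outer comprehension: A's slice of row i equals B's filtered scan of row i'.
theorem pv_elem (a : List (List Int)) (i i' u v c : Int)
    (hii : i = i') (hu : u = 3*c) (hv : v = u + 3) (hc : 0 ≤ c) :
    PySem.List.slice ((PySem.List.pyGet? a i).getD []) (some u) (some v)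
    = (PySem.List.enumerate ((PySem.List.pyGet? a i').getD [])).filterMap
        (fun q => if PySem.Int.floordiv q.1 3 = c then some q.2 else none) := by
  subst hii hu hv
  rw [pv_inner c hc, pv_slice3 _ (3*c) _ (by omega) rfl]

-- ===== VERDICT (by name: the statement is the Claim_ definition above) =====
theorem whatSquare_spec : Claim_equal_whatSquare := by
  intro a row col _ _
  show whatSquare a row col = whatSquare_alt a row col
  unfold whatSquare whatSquare_alt
  have hp0 : PySem.List.pyRange 0 3 1 = [0, 1, 2] := by decide
  have hp3 : PySem.List.pyRange 3 6 1 = [3, 4, 5] := by decide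
  have hp6 : PySem.List.pyRange 6 9 1 = [6, 7, 8] := by decide
  by_cases h1 : row < 3
  · rw [if_pos h1, if_neg (show ¬(3:Int) ≤ row by omega), if_neg (show ¬(6:Int) ≤ row by omega)]
    by_cases c1 : col < 3
    · rw [if_pos c1, if_neg (show ¬(3:Int) ≤ col by omega), if_neg (show ¬(6:Int) ≤ col by omega),
          hp0]
      simp only [List.map_cons, List.map_nil, List.cons.injEq, and_true]
      exact ⟨pv_elem a _ _ _ _ _ (by norm_num) (by norm_num) (by norm_num) (by norm_num),
        pv_elem a _ _ _ _ _ (by norm_num) (by norm_num) (by norm_num) (by norm_num),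
        pv_elem a _ _ _ _ _ (by norm_num) (by norm_num) (by norm_num) (by norm_num)⟩
    · by_cases c2 : col < 6
      · rw [if_neg c1, if_pos c2, if_pos (show (3:Int) ≤ col by omega),
            if_neg (show ¬(6:Int) ≤ col by omega), hp0]
        simp only [List.map_cons, List.map_nil, List.cons.injEq, and_true]
        exact ⟨pv_elem a _ _ _ _ _ (by norm_num) (by norm_num) (by norm_num) (by norm_num),
          pv_elem a _ _ _ _ _ (by norm_num) (by norm_num) (by norm_num) (by norm_num),
          pv_elem a _ _ _ _ _ (by norm_num) (by norm_num) (by norm_num) (by norm_num)⟩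
      · rw [if_neg c1, if_neg c2, if_pos (show (3:Int) ≤ col by omega),
            if_pos (show (6:Int) ≤ col by omega), hp0]
        simp only [List.map_cons, List.map_nil, List.cons.injEq, and_true]
        exact ⟨pv_elem a _ _ _ _ _ (by norm_num) (by norm_num) (by norm_num) (by norm_num),
          pv_elem a _ _ _ _ _ (by norm_num) (by norm_num) (by norm_num) (by norm_num),
          pv_elem a _ _ _ _ _ (by norm_num) (by norm_num) (by norm_num) (by norm_num)⟩
  · by_cases h2 : row < 6
    · rw [if_neg h1, if_pos h2, if_pos (show (3:Int) ≤ row by omega),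
          if_neg (show ¬(6:Int) ≤ row by omega)]
      by_cases c1 : col < 3
      · rw [if_pos c1, if_neg (show ¬(3:Int) ≤ col by omega),
            if_neg (show ¬(6:Int) ≤ col by omega), hp3, hp0]
        simp only [List.map_cons, List.map_nil, List.cons.injEq, and_true]
        exact ⟨pv_elem a _ _ _ _ _ (by norm_num) (by norm_num) (by norm_num) (by norm_num),
          pv_elem a _ _ _ _ _ (by norm_num) (by norm_num) (by norm_num) (by norm_num),
          pv_elem a _ _ _ _ _ (by norm_num) (by norm_num) (by norm_num) (by norm_num)⟩
      · by_cases c2 : col < 6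
        · rw [if_neg c1, if_pos c2, if_pos (show (3:Int) ≤ col by omega),
              if_neg (show ¬(6:Int) ≤ col by omega), hp3, hp0]
          simp only [List.map_cons, List.map_nil, List.cons.injEq, and_true]
          exact ⟨pv_elem a _ _ _ _ _ (by norm_num) (by norm_num) (by norm_num) (by norm_num),
            pv_elem a _ _ _ _ _ (by norm_num) (by norm_num) (by norm_num) (by norm_num),
            pv_elem a _ _ _ _ _ (by norm_num) (by norm_num) (by norm_num) (by norm_num)⟩
        · rw [if_neg c1, if_neg c2, if_pos (show (3:Int) ≤ col by omega),
              if_pos (show (6:Int) ≤ col by omega), hp3, hp0]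
          simp only [List.map_cons, List.map_nil, List.cons.injEq, and_true]
          exact ⟨pv_elem a _ _ _ _ _ (by norm_num) (by norm_num) (by norm_num) (by norm_num),
            pv_elem a _ _ _ _ _ (by norm_num) (by norm_num) (by norm_num) (by norm_num),
            pv_elem a _ _ _ _ _ (by norm_num) (by norm_num) (by norm_num) (by norm_num)⟩
    · rw [if_neg h1, if_neg h2, if_pos (show (3:Int) ≤ row by omega),
          if_pos (show (6:Int) ≤ row by omega)]
      by_cases c1 : col < 3
      · rw [if_pos c1, if_neg (show ¬(3:Int) ≤ col by omega),
            if_neg (show ¬(6:Int) ≤ col by omega), hp6, hp0]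
        simp only [List.map_cons, List.map_nil, List.cons.injEq, and_true]
        exact ⟨pv_elem a _ _ _ _ _ (by norm_num) (by norm_num) (by norm_num) (by norm_num),
          pv_elem a _ _ _ _ _ (by norm_num) (by norm_num) (by norm_num) (by norm_num),
          pv_elem a _ _ _ _ _ (by norm_num) (by norm_num) (by norm_num) (by norm_num)⟩
      · by_cases c2 : col < 6
        · rw [if_neg c1, if_pos c2, if_pos (show (3:Int) ≤ col by omega),
              if_neg (show ¬(6:Int) ≤ col by omega), hp6, hp0]
          simp only [List.map_cons, List.map_nil, List.cons.injEq, and_true]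
          exact ⟨pv_elem a _ _ _ _ _ (by norm_num) (by norm_num) (by norm_num) (by norm_num),
            pv_elem a _ _ _ _ _ (by norm_num) (by norm_num) (by norm_num) (by norm_num),
            pv_elem a _ _ _ _ _ (by norm_num) (by norm_num) (by norm_num) (by norm_num)⟩
        · rw [if_neg c1, if_neg c2, if_pos (show (3:Int) ≤ col by omega),
              if_pos (show (6:Int) ≤ col by omega), hp6, hp0]
          simp only [List.map_cons, List.map_nil, List.cons.injEq, and_true]
          exact ⟨pv_elem a _ _ _ _ _ (by norm_num) (by norm_num) (by norm_num) (by norm_num),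
            pv_elem a _ _ _ _ _ (by norm_num) (by norm_num) (by norm_num) (by norm_num),
            pv_elem a _ _ _ _ _ (by norm_num) (by norm_num) (by norm_num) (by norm_num)⟩
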